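-- pv_equiv track=rewrite | github.com/shadowcz007/comfyui-liveportrait | nodes/LivePortrait/src/live_portrait_pipeline.py | create_drivings
-- ===== SOURCE A (Python) =====
-- def create_drivings(elements, max_count, revert=False):
--     if not revert:
--         if max_count <= len(elements):
--             return elements[:max_count]
--         elif len(elements)>0:
--             return [elements[i % len(elements)] for i in range(max_count)]
--         else:
--             return [None for i in range(max_count)]
--     else:
--         if len(elements)==0:
--             return [None for i in range(max_count)]
--         extended_frames = elements + elements[-2:0:-1]  # 正向加反向中间部分
--         if max_count <= len(extended_frames):
--             return extended_frames[:max_count]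
--         else:
--             return [extended_frames[i % len(extended_frames)] for i in range(max_count)]
-- ===== SOURCE B (Python) =====
-- def create_drivings(elements, max_count, revert=False):
--     if not elements:
--         return [None] * max_count
--     out = elements + elements[-2:0:-1] if revert else list(elements)
--     while len(out) < max_count:
--         out += out
--     return out[:max_count]
-- ===== Notes on version B (the rewrite author's own statement) =====
-- stated objective: simpler
-- what changed: B replaces A's four-way branch with per-index modular comprehension by a geometric doubling loop (repeatedly self-concatenate the pattern until it is long enough) followed by a single slice, so there is no index arithmetic at all.
import Mathlib
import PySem

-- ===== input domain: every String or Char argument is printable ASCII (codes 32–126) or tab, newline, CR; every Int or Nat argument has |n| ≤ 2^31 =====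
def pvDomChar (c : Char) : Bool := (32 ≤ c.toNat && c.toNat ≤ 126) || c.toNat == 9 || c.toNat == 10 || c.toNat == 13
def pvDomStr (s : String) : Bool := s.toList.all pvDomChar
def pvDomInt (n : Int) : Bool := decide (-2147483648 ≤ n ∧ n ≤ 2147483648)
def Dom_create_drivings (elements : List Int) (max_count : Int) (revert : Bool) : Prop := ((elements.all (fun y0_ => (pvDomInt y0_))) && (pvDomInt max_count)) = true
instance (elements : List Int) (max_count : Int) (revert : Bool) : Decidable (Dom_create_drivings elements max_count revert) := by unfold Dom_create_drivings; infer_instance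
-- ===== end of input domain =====

-- B replaces A's per-index modular comprehension and four-way branch by a geometric doubling loop (self-concatenate the pattern until long enough) followed by one slice (simpler decomposition).


-- ===== PORT A =====
-- elements[-2:0:-1] (both Pythons contain this same expression; step -1 ≠ 0, so slice? is always some)
def pvMidRev (xs : List Int) : List Int :=
  (PySem.List.slice? xs (some (-2)) (some 0) (-1)).getD []

def create_drivings (elements : List Int) (max_count : Int) (revert : Bool) : List (Option Int) :=
  if !revert then
    if max_count ≤ (elements.length : Int) then
      (PySem.List.slice elements none (some max_count)).map some
    else if (0 : Int) < (elements.length : Int) then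
      (PySem.List.pyRange 0 max_count 1).map
        (fun i => PySem.List.pyGet? elements (PySem.Int.mod i (elements.length : Int)))
    else
      (PySem.List.pyRange 0 max_count 1).map (fun _ => (none : Option Int))
  else
    if elements.length = 0 then
      (PySem.List.pyRange 0 max_count 1).map (fun _ => (none : Option Int))
    else
      let extended_frames := elements ++ pvMidRev elements
      if max_count ≤ (extended_frames.length : Int) then
        (PySem.List.slice extended_frames none (some max_count)).map some
      else
        (PySem.List.pyRange 0 max_count 1).map
          (fun i => PySem.List.pyGet? extended_frames (PySem.Int.mod i (extended_frames.length : Int)))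

-- ===== PORT B =====
-- while len(out) < max_count: out += out   (the 'out ≠ []' guard only makes the recursion
-- terminating; at B's call site out is never empty)
def pvDouble (m : Int) (out : List Int) : List Int :=
  if h : out ≠ [] ∧ (out.length : Int) < m then pvDouble m (out ++ out) else out
termination_by m.toNat - out.length
decreasing_by
  have h1 : 0 < out.length := List.length_pos_iff.mpr h.1
  have h2 : (out.length : Int) < m := h.2
  simp only [List.length_append]
  omega

def create_drivings_alt (elements : List Int) (max_count : Int) (revert : Bool) : List (Option Int) :=
  if elements = [] then
    List.replicate max_count.toNat (none : Option Int)   -- [None] * max_count (negative count → empty)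
  else
    let out := if revert then elements ++ pvMidRev elements else elements
    (PySem.List.slice (pvDouble max_count out) none (some max_count)).map some

-- ===== PRECONDITION & SPEC =====
def Spec_create_drivings (elements : List Int) (max_count : Int) (revert : Bool) (out : List (Option Int)) : Prop := out = create_drivings_alt elements max_count revert
instance (elements : List Int) (max_count : Int) (revert : Bool) (out : List (Option Int)) : Decidable (Spec_create_drivings elements max_count revert out) := by unfold Spec_create_drivings; infer_instance

-- ===== CLAIM (what is proved, stated in full; the proofs are below) =====
def Claim_equal_create_drivings : Prop := ∀ (elements : List Int) (max_count : Int) (revert : Bool), Dom_create_drivings elements max_count revert → Spec_create_drivings elements max_count revert (create_drivings elements max_count revert)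

-- ===== LEMMAS AND PROOFS =====

lemma pvDouble_le (m : Int) (L : List Int) (h : m ≤ (L.length : Int)) : pvDouble m L = L := by
  rw [pvDouble, dif_neg]
  exact fun hc => absurd hc.2 (not_lt.mpr h)

lemma rep_double (L : List Int) (n : Nat) :
    (List.replicate n (L ++ L)).flatten = (List.replicate (2 * n) L).flatten := by
  induction n with
  | zero => simp
  | succ k ih =>
      have h2 : 2 * (k + 1) = (2 * k) + 1 + 1 := by omega
      rw [h2]
      simp [List.replicate_succ, ih, List.append_assoc]

-- pvDouble on a non-empty list that is still too short returns some whole-pattern replication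
-- that is long enough
lemma pvDouble_rep (m : Int) (L : List Int) (hL : L ≠ []) (hm : (L.length : Int) < m) :
    ∃ n : Nat, 1 ≤ n ∧ pvDouble m L = (List.replicate n L).flatten ∧
      m ≤ ((n * L.length : Nat) : Int) := by
  have H : ∀ k (L : List Int), m.toNat - L.length = k → L ≠ [] → (L.length : Int) < m →
      ∃ n : Nat, 1 ≤ n ∧ pvDouble m L = (List.replicate n L).flatten ∧
        m ≤ ((n * L.length : Nat) : Int) := by
    intro k
    induction k using Nat.strong_induction_on with
    | _ k ih =>
      intro L hk hL hm
      have hpos : 0 < L.length := List.length_pos_iff.mpr hL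
      rw [pvDouble, dif_pos ⟨hL, hm⟩]
      by_cases hlong : ((L ++ L).length : Int) < m
      · have hlt : m.toNat - (L ++ L).length < k := by
          simp only [List.length_append] at *
          omega
        obtain ⟨n, hn1, hn2, hn3⟩ := ih _ hlt (L ++ L) rfl (by simp [hL]) hlong
        refine ⟨2 * n, by omega, by rw [hn2, rep_double], ?_⟩
        simp only [List.length_append] at hn3
        push_cast at hn3 ⊢
        have : (2 * n * L.length : Int) = n * (L.length + L.length) := by ring
        omega
      · refine ⟨2, by omega, ?_, ?_⟩
        · rw [pvDouble_le m (L ++ L) (le_of_not_gt hlong)]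
          simp [List.replicate_succ]
        · simp only [List.length_append, not_lt] at hlong
          push_cast at hlong ⊢
          omega
  exact H _ L rfl hL hm

-- taking q*|L|+r elements of a long enough replication = q whole copies plus a head of L
lemma flat_take (L : List Int) (q r : Nat) (hr : r < L.length) :
    ∀ n, q * L.length + r ≤ n * L.length →
      ((List.replicate n L).flatten.take (q * L.length + r)) = (List.replicate q L).flatten ++ L.take r := by
  induction q with
  | zero =>
      intro n hn
      simp only [Nat.zero_mul, Nat.zero_add, List.replicate_zero, List.flatten_nil, List.nil_append]
      cases n with
      | zero =>
          have hr0 : r = 0 := by omega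
          subst hr0
          simp
      | succ n' =>
          simp only [List.replicate_succ, List.flatten_cons]
          rw [List.take_append]
          have : r - L.length = 0 := by omega
          rw [this, List.take_zero, List.append_nil]
  | succ q ih =>
      intro n hn
      have hpos : 0 < L.length := by omega
      cases n with
      | zero =>
          exfalso
          have h1 : L.length ≤ (q + 1) * L.length := Nat.le_mul_of_pos_left _ (Nat.succ_pos q)
          simp only [Nat.zero_mul, Nat.le_zero] at hn
          omega
      | succ n' =>
          have harith : (q + 1) * L.length + r = L.length + (q * L.length + r) := by ring
          rw [harith]
          simp only [List.replicate_succ, List.flatten_cons]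
          rw [List.take_append]
          have h1 : L.take (L.length + (q * L.length + r)) = L := List.take_of_length_le (by omega)
          have h2 : L.length + (q * L.length + r) - L.length = q * L.length + r := by omega
          rw [h1, h2, ih n' (by simp only [Nat.succ_mul] at hn; omega)]
          simp [List.append_assoc]

-- per-index modular tiling (A's comprehension) = a prefix of a long enough replication
lemma pv_block (L : List Int) (q r : Nat) (hr : r < L.length) :
    (List.range (q * L.length + r)).map (fun k => L[k % L.length]?)
      = ((List.replicate q L).flatten ++ L.take r).map some := by
  induction q with
  | zero =>
      simp only [Nat.zero_mul, Nat.zero_add, List.replicate_zero, List.flatten_nil, List.nil_append]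
      apply List.ext_getElem
      · simp [Nat.le_of_lt hr]
      · intro i h1 h2
        simp only [List.getElem_map, List.getElem_range, List.getElem_take]
        have hi : i < r := by simpa using h1
        rw [Nat.mod_eq_of_lt (lt_trans hi hr)]
        rw [List.getElem?_eq_getElem (lt_trans hi hr)]
  | succ q ih =>
      have hsplit : (q + 1) * L.length + r = L.length + (q * L.length + r) := by ring
      rw [hsplit, List.range_add, List.map_append, List.map_map]
      have h1 : (List.range L.length).map (fun k => L[k % L.length]?) = L.map some := by
        apply List.ext_getElem
        · simp
        · intro i hi1 hi2
          simp only [List.getElem_map, List.getElem_range]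
          have : i < L.length := by simpa using hi1
          rw [Nat.mod_eq_of_lt this, List.getElem?_eq_getElem this]
      have h2 : ((List.range (q * L.length + r)).map ((fun k => L[k % L.length]?) ∘ (L.length + ·)))
          = (List.range (q * L.length + r)).map (fun k => L[k % L.length]?) := by
        apply List.map_congr_left
        intro k _
        simp [Function.comp, Nat.add_mod_left]
      rw [h1, h2, ih]
      simp [List.replicate_succ, List.flatten_cons, List.map_append, List.append_assoc]

-- A's modular comprehension equals B's (take of a sufficient replication), mapped to options
lemma pv_tile (L : List Int) (hL : L ≠ []) (m : Int) (hm : (L.length : Int) < m)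
    (n : Nat) (hn : m ≤ ((n * L.length : Nat) : Int)) :
    (PySem.List.pyRange 0 m 1).map (fun i => PySem.List.pyGet? L (PySem.Int.mod i (L.length : Int)))
      = ((List.replicate n L).flatten.take m.toNat).map some := by
  have hlen : 0 < L.length := List.length_pos_iff.mpr hL
  have hm0 : 0 ≤ m := le_of_lt (lt_of_le_of_lt (by exact_mod_cast Nat.zero_le _) hm)
  obtain ⟨m', rfl⟩ : ∃ m' : Nat, m = (m' : Int) := ⟨m.toNat, (Int.toNat_of_nonneg hm0).symm⟩
  have hlhs : (PySem.List.pyRange 0 (m' : Int) 1).map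
        (fun i => PySem.List.pyGet? L (PySem.Int.mod i (L.length : Int)))
      = (List.range m').map (fun k => L[k % L.length]?) := by
    rw [PySem.List.pyRange_one, List.map_map]
    simp only [Int.sub_zero, Int.toNat_natCast]
    apply List.map_congr_left
    intro k _
    show PySem.List.pyGet? L (PySem.Int.mod (0 + (k : Int)) (L.length : Int)) = L[k % L.length]?
    rw [Int.zero_add, PySem.Int.mod_natCast, PySem.List.pyGet?_natCast]
  rw [hlhs]
  obtain ⟨q, r, hrlt, rfl⟩ : ∃ q r, r < L.length ∧ m' = q * L.length + r :=
    ⟨m' / L.length, m' % L.length, Nat.mod_lt _ hlen,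
      by rw [Nat.mul_comm]; exact (Nat.div_add_mod m' L.length).symm⟩
  have hle : q * L.length + r ≤ n * L.length := by exact_mod_cast hn
  rw [pv_block L q r hrlt, Int.toNat_natCast, flat_take L q r hrlt n hle, List.map_append]

theorem create_drivings_spec : Claim_equal_create_drivings := by
  intro elements max_count revert _
  unfold Spec_create_drivings create_drivings create_drivings_alt
  by_cases hE : elements = []
  · subst hE
    by_cases hm : max_count ≤ (0 : Int)
    · have h0 : max_count.toNat = 0 := by omega
      cases revert <;> simp [hm, h0, PySem.List.slice]
    · cases revert <;>
        · simp only [Bool.not_false, Bool.not_true, reduceIte, List.length_nil,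
            Nat.cast_zero, if_neg hm, lt_irrefl, ite_self]
          simp [PySem.List.pyRange_one]
          apply List.ext_getElem <;> simp
  · have hlen : 0 < elements.length := List.length_pos_iff.mpr hE
    cases revert
    · -- not revert, non-empty
      simp only [Bool.not_false, reduceIte, if_neg hE, Bool.false_eq_true]
      by_cases hm : max_count ≤ (elements.length : Int)
      · rw [if_pos hm, pvDouble_le _ _ hm]
      · have hlt : (elements.length : Int) < max_count := by omega
        rw [if_neg hm, if_pos (by exact_mod_cast hlen)]
        obtain ⟨n, _, heq, hle⟩ := pvDouble_rep max_count elements hE hlt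
        rw [heq, PySem.List.slice_to _ (by omega : (0:Int) ≤ max_count),
          pv_tile elements hE max_count hlt n hle]
    · -- revert, non-empty
      simp only [Bool.not_true, reduceIte, Bool.false_eq_true, if_false, if_neg hE]
      rw [if_neg (by omega : ¬ elements.length = 0)]
      set ext := elements ++ pvMidRev elements with hext
      have hextne : ext ≠ [] := by simp [hext, hE]
      have hextlen : 0 < ext.length := List.length_pos_iff.mpr hextne
      by_cases hm : max_count ≤ (ext.length : Int)
      · rw [if_pos hm, pvDouble_le _ _ hm]
      · have hlt : (ext.length : Int) < max_count := by omega
        rw [if_neg hm]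
        obtain ⟨n, _, heq, hle⟩ := pvDouble_rep max_count ext hextne hlt
        rw [heq, PySem.List.slice_to _ (by omega : (0:Int) ≤ max_count),
          pv_tile ext hextne max_count hlt n hle]
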